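-- pv_equiv track=rewrite | github.com/pypi-data/pypi-mirror-396 | packages/heapx/heapx-0.0.3.tar.gz/heapx-0.0.3/tests/test_push.py | is_valid_heap
-- ===== SOURCE A (Python) =====
-- from typing import List, Any, Callable, Tuple
--
-- def is_valid_heap(arr: List[Any], max_heap: bool = False, arity: int = 2) -> bool:
--   """Verify heap property for n-ary heap."""
--   n = len(arr)
--   for i in range(n):
--     for j in range(1, arity + 1):
--       child = arity * i + j
--       if child >= n:
--         break
--       if max_heap:
--         if arr[i] < arr[child]:
--           return False
--       else:
--         if arr[i] > arr[child]:
--           return False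
--   return True
-- ===== SOURCE B (Python) =====
-- def is_valid_heap(arr, max_heap=False, arity=2):
--   """Verify heap property for n-ary heap: one pass over child->parent edges."""
--   if arity < 1:
--     return True
--   for c in range(1, len(arr)):
--     p = (c - 1) // arity
--     if (arr[p] < arr[c]) if max_heap else (arr[p] > arr[c]):
--       return False
--   return True
-- ===== Notes on version B (the rewrite author's own statement) =====
-- stated objective: simpler
-- what changed: Replaces the nested parent-over-children loops (with break) by a single pass over every non-root index computing its parent as (c-1)//arity, guarded by arity<1 where no child exists.
import Mathlib
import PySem

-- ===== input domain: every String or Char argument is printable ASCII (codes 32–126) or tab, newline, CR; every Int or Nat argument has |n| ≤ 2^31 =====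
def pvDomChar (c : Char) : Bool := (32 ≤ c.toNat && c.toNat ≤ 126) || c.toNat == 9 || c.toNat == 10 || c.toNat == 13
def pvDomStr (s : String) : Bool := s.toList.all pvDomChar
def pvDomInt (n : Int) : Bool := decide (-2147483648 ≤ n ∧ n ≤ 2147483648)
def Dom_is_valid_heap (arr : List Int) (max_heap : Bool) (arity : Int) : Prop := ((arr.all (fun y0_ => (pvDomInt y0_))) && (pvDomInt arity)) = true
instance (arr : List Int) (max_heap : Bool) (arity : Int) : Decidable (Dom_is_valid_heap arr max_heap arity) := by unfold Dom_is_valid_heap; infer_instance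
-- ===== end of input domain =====

-- B iterates once over child→parent edges instead of A's nested parent→children loops; objective: simpler.

-- ===== PORT A =====
-- inner 'for j in range(1, arity+1)' with 'break' and 'return False';
-- result true = loop finished or broke (continue outer loop), false = 'return False'
def checkChildren (arr : List Int) (max_heap : Bool) (arity n i : Int) : List Int → Bool
  | [] => true
  | j :: js =>
      let child := arity * i + j
      if n ≤ child then true
      else if (if max_heap then decide (PySem.List.pyGetD arr i 0 < PySem.List.pyGetD arr child 0)
               else decide (PySem.List.pyGetD arr i 0 > PySem.List.pyGetD arr child 0)) then false
      else checkChildren arr max_heap arity n i js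
-- arr[i], arr[child]: pyGetD with default 0 is exact here, the indices are always in range (0 ≤ i < n, 0 ≤ child < n)

def is_valid_heap (arr : List Int) (max_heap : Bool) (arity : Int) : Bool :=
  let n : Int := arr.length
  (PySem.List.pyRange 0 n 1).all fun i =>
    checkChildren arr max_heap arity n i (PySem.List.pyRange 1 (arity + 1) 1)

-- ===== PORT B =====
def is_valid_heap_alt (arr : List Int) (max_heap : Bool) (arity : Int) : Bool :=
  if arity < 1 then true
  else (PySem.List.pyRange 1 (arr.length : Int) 1).all fun c =>
    let p := PySem.Int.floordiv (c - 1) arity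
    !(if max_heap then decide (PySem.List.pyGetD arr p 0 < PySem.List.pyGetD arr c 0)
      else decide (PySem.List.pyGetD arr p 0 > PySem.List.pyGetD arr c 0))

-- ===== PRECONDITION & SPEC =====
def Spec_is_valid_heap (arr : List Int) (max_heap : Bool) (arity : Int) (out : Bool) : Prop := out = is_valid_heap_alt arr max_heap arity
instance (arr : List Int) (max_heap : Bool) (arity : Int) (out : Bool) : Decidable (Spec_is_valid_heap arr max_heap arity out) := by unfold Spec_is_valid_heap; infer_instance

-- ===== CLAIM (what is proved, stated in full; the proofs are below) =====
def Claim_equal_is_valid_heap : Prop := ∀ (arr : List Int) (max_heap : Bool) (arity : Int), Dom_is_valid_heap arr max_heap arity → Spec_is_valid_heap arr max_heap arity (is_valid_heap arr max_heap arity)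

-- ===== LEMMAS AND PROOFS =====

-- the Boolean "heap violation at parent p, child c" test shared by both ports
def pvBad (arr : List Int) (max_heap : Bool) (p c : Int) : Bool :=
  if max_heap then decide (PySem.List.pyGetD arr p 0 < PySem.List.pyGetD arr c 0)
  else decide (PySem.List.pyGetD arr p 0 > PySem.List.pyGetD arr c 0)

-- A's inner loop (over a strictly increasing list of offsets j) succeeds iff
-- no in-range child arity*i+j violates the heap property w.r.t. parent i
lemma checkChildren_eq_true_iff (arr : List Int) (max_heap : Bool) (arity n i : Int)
    (js : List Int) (hs : js.Pairwise (· < ·)) :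
    checkChildren arr max_heap arity n i js = true ↔
      ∀ j ∈ js, arity * i + j < n → pvBad arr max_heap i (arity * i + j) = false := by
  induction js with
  | nil => simp [checkChildren]
  | cons j js ih =>
    rcases List.pairwise_cons.mp hs with ⟨hj, hjs⟩
    simp only [checkChildren]
    by_cases hbr : n ≤ arity * i + j
    · rw [if_pos hbr]
      constructor
      · intro _ j' hj' hlt
        rw [List.mem_cons] at hj'
        rcases hj' with rfl | h
        · omega
        · exact absurd hlt (by have := hj j' h; omega)
      · intro _; rfl
    · rw [if_neg hbr]
      by_cases hb : pvBad arr max_heap i (arity * i + j) = true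
      · rw [if_pos (by simpa [pvBad] using hb)]
        simp only [Bool.false_eq_true, false_iff]
        intro h
        have := h j (List.mem_cons_self) (by omega)
        rw [this] at hb
        exact Bool.false_ne_true hb
      · have hbf : pvBad arr max_heap i (arity * i + j) = false :=
          Bool.eq_false_iff.mpr hb
        rw [if_neg (by simpa [pvBad] using hb)]
        rw [ih hjs]
        constructor
        · intro h j' hj' hlt
          rw [List.mem_cons] at hj'
          rcases hj' with rfl | h'
          · exact hbf
          · exact h j' h' hlt
        · intro h j' hj' hlt
          exact h j' (List.mem_cons_of_mem j hj') hlt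

-- parent index computed by B, as an Int-ediv (valid since arity > 0)
lemma floordiv_parent (c arity : Int) (h : 0 < arity) :
    PySem.Int.floordiv (c - 1) arity = (c - 1) / arity :=
  PySem.Int.floordiv_eq_ediv_of_pos h

-- the child→parent bijection, forward direction: every non-root index c is the
-- j-th child (j = c - arity*i ∈ [1, arity]) of i = (c-1)/arity, with 0 ≤ i ≤ c-1
lemma parent_facts (c arity : Int) (ha : 0 < arity) (hc : 1 ≤ c) :
    0 ≤ (c - 1) / arity ∧ (c - 1) / arity ≤ c - 1 ∧
    1 ≤ c - arity * ((c - 1) / arity) ∧ c - arity * ((c - 1) / arity) ≤ arity := by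
  have h0 : 0 ≤ c - 1 := by omega
  have hdiv : arity * ((c - 1) / arity) + (c - 1) % arity = c - 1 :=
    Int.ediv_add_emod (c - 1) arity
  have hm0 : 0 ≤ (c - 1) % arity := Int.emod_nonneg _ (by omega)
  have hm1 : (c - 1) % arity < arity := Int.emod_lt_of_pos _ ha
  refine ⟨Int.ediv_nonneg h0 (by omega), Int.ediv_le_self _ h0, by omega, by omega⟩

-- the child→parent bijection, backward direction: the j-th child of i (1 ≤ j ≤ arity)
-- has parent exactly i
lemma child_parent (i j arity : Int) (ha : 0 < arity) (h1 : 1 ≤ j) (h2 : j ≤ arity) :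
    (arity * i + j - 1) / arity = i := by
  have : arity * i + j - 1 = (j - 1) + i * arity := by ring
  rw [this, Int.add_mul_ediv_right _ _ (by omega : arity ≠ 0),
      Int.ediv_eq_zero_of_lt (by omega) (by omega), zero_add]

lemma is_valid_heap_eq_alt (arr : List Int) (max_heap : Bool) (arity : Int) :
    is_valid_heap arr max_heap arity = is_valid_heap_alt arr max_heap arity := by
  by_cases ha : arity < 1
  · -- arity < 1: A's inner range is empty, both sides are true
    have : PySem.List.pyRange 1 (arity + 1) 1 = [] :=
      PySem.List.pyRange_one_eq_nil (by omega)
    simp [is_valid_heap, is_valid_heap_alt, this, checkChildren, if_pos ha]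
  · have ha' : 0 < arity := by omega
    have hA : is_valid_heap arr max_heap arity = true ↔
        ∀ i, 0 ≤ i → i < (arr.length : Int) →
          ∀ j, 1 ≤ j → j ≤ arity → arity * i + j < (arr.length : Int) →
            pvBad arr max_heap i (arity * i + j) = false := by
      simp only [is_valid_heap, List.all_eq_true]
      constructor
      · intro h i h0 h1 j hj1 hj2 hlt
        have := (checkChildren_eq_true_iff arr max_heap arity (arr.length : Int) i _
          (PySem.List.pairwise_lt_pyRange_one 1 (arity + 1))).mp
          (h i (by rw [PySem.List.mem_pyRange_one]; omega))
        exact this j (by rw [PySem.List.mem_pyRange_one]; omega) hlt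
      · intro h i hi
        rw [PySem.List.mem_pyRange_one] at hi
        rw [checkChildren_eq_true_iff arr max_heap arity (arr.length : Int) i _
          (PySem.List.pairwise_lt_pyRange_one 1 (arity + 1))]
        intro j hj hlt
        rw [PySem.List.mem_pyRange_one] at hj
        exact h i hi.1 hi.2 j hj.1 (by omega) hlt
    have hB : is_valid_heap_alt arr max_heap arity = true ↔
        ∀ c, 1 ≤ c → c < (arr.length : Int) →
          pvBad arr max_heap ((c - 1) / arity) c = false := by
      simp only [is_valid_heap_alt, if_neg ha, List.all_eq_true]
      constructor
      · intro h c h1 h2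
        have := h c (by rw [PySem.List.mem_pyRange_one]; omega)
        rw [floordiv_parent c arity ha'] at this
        simpa [pvBad] using this
      · intro h c hc
        rw [PySem.List.mem_pyRange_one] at hc
        have := h c hc.1 hc.2
        rw [floordiv_parent c arity ha']
        simpa [pvBad] using this
    have hmain : (∀ i, 0 ≤ i → i < (arr.length : Int) →
          ∀ j, 1 ≤ j → j ≤ arity → arity * i + j < (arr.length : Int) →
            pvBad arr max_heap i (arity * i + j) = false) ↔
        (∀ c, 1 ≤ c → c < (arr.length : Int) →
          pvBad arr max_heap ((c - 1) / arity) c = false) := by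
      constructor
      · intro h c h1 h2
        obtain ⟨hp0, hple, hj1, hj2⟩ := parent_facts c arity ha' h1
        set i := (c - 1) / arity with hi
        have hc : arity * i + (c - arity * i) = c := by ring
        have := h i hp0 (by omega) (c - arity * i) hj1 hj2 (by omega)
        rwa [hc] at this
      · intro h i h0 h1 j hj1 hj2 hlt
        have hc1 : 1 ≤ arity * i + j := by
          have : 0 ≤ arity * i := mul_nonneg (by omega) h0
          omega
        have := h (arity * i + j) hc1 hlt
        rwa [child_parent i j arity ha' hj1 hj2] at this
    cases hAval : is_valid_heap arr max_heap arity
    · cases hBval : is_valid_heap_alt arr max_heap arity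
      · rfl
      · exact absurd (hA.mpr (hmain.mpr (hB.mp hBval))) (by rw [hAval]; exact Bool.false_ne_true)
    · exact (hB.mpr (hmain.mp (hA.mp hAval))).symm

-- ===== VERDICT (by name: the statement is the Claim_ definition above) =====
theorem is_valid_heap_spec : Claim_equal_is_valid_heap := by
  intro arr max_heap arity _
  unfold Spec_is_valid_heap
  exact is_valid_heap_eq_alt arr max_heap arity
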